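-- pv_equiv track=rewrite | github.com/tdodson0612/Algorithm-Visualizer | algo_visualizer.py | generate_greedy_steps
-- ===== SOURCE A (Python) =====
-- def generate_greedy_steps(arr):
--     steps = []
--     arr_sorted = sorted(arr)
--     used = [False]*len(arr)
--     result = []
--     for val in arr_sorted:
--         for i, x in enumerate(arr):
--             if not used[i] and x == val:
--                 used[i] = True
--                 result.append(x)
--                 steps.append(([i], result[:]))
--                 break
--     return steps
-- ===== SOURCE B (Python) =====
-- def generate_greedy_steps(arr):
--     # Stable argsort: one index-ordered pass, no used flags and no inner scan.
--     steps = []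
--     result = []
--     for i in sorted(range(len(arr)), key=lambda i: arr[i]):
--         result.append(arr[i])
--         steps.append(([i], result[:]))
--     return steps
-- ===== Notes on version B (the rewrite author's own statement) =====
-- stated objective: simpler
-- what changed: Replaced the per-value inner scan over arr with a used-flag array by a stable argsort of the indices followed by a single pass that emits each step directly.
import Mathlib
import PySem

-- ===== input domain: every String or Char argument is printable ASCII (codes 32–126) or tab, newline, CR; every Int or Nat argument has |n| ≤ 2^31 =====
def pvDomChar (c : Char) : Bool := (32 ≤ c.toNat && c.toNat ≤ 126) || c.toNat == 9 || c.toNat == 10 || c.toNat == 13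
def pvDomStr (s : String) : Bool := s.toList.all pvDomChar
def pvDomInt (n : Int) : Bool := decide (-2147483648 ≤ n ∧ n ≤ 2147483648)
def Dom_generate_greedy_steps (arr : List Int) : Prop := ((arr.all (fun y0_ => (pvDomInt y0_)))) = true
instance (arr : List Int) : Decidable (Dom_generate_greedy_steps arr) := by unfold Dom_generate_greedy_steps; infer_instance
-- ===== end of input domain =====

-- B replaces A's per-value inner scan with used-flags by a stable argsort of indices and one pass: shorter and plainer; output size keeps both quadratic.


-- ===== PORT A =====
-- inner 'for i, x in enumerate(arr): if not used[i] and x == val: … break' — the scan up to the first hit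
-- (i.toNat is exact here: enumerate indices are ≥ 0)
def gsFind (used : List Bool) (val : Int) : List (Int × Int) → Option (Int × Int)
  | [] => none
  | (i, x) :: rest =>
      if !(used.getD i.toNat false) && (x == val) then some (i, x)
      else gsFind used val rest

-- outer 'for val in arr_sorted' with state (steps, used, result)
def gsLoopA (arr : List Int) :
    List Int → (List (List Int × List Int) × List Bool × List Int) →
    (List (List Int × List Int) × List Bool × List Int)
  | [], st => st
  | val :: vs, (steps, used, result) =>
      match gsFind used val (PySem.List.enumerate arr) with
      | some (i, x) =>
          gsLoopA arr vs (steps ++ [([i], result ++ [x])], used.set i.toNat true, result ++ [x])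
      | none => gsLoopA arr vs (steps, used, result)

def generate_greedy_steps (arr : List Int) : List (List Int × List Int) :=
  (gsLoopA arr (PySem.List.sorted arr (fun x => x) false)
    ([], List.replicate arr.length false, [])).1

-- ===== PORT B =====
-- arr[i]; exact here: every index fed to it comes from range(len(arr))
def gsKey (arr : List Int) (i : Int) : Int := PySem.List.pyGetD arr i 0

def generate_greedy_steps_alt (arr : List Int) : List (List Int × List Int) :=
  let order := PySem.List.sorted (PySem.List.pyRange 0 (PySem.List.len arr)) (gsKey arr) false
  (order.foldl
      (fun (st : List (List Int × List Int) × List Int) i =>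
        let result := st.2 ++ [gsKey arr i]
        (st.1 ++ [([i], result)], result))
      ([], [])).1

-- ===== PRECONDITION & SPEC =====
def Spec_generate_greedy_steps (arr : List Int) (out : List (List Int × List Int)) : Prop := out = generate_greedy_steps_alt arr
instance (arr : List Int) (out : List (List Int × List Int)) : Decidable (Spec_generate_greedy_steps arr out) := by unfold Spec_generate_greedy_steps; infer_instance

-- ===== CLAIM (what is proved, stated in full; the proofs are below) =====
def Claim_equal_generate_greedy_steps : Prop := ∀ (arr : List Int), Dom_generate_greedy_steps arr → Spec_generate_greedy_steps arr (generate_greedy_steps arr)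

-- ===== LEMMAS AND PROOFS =====

-- strict lexicographic order (key, then index): the order in which A selects indices
def gsLex (arr : List Int) (a b : Int) : Prop :=
  gsKey arr a < gsKey arr b ∨ (gsKey arr a = gsKey arr b ∧ a < b)

theorem gsLex_irrefl (arr : List Int) (a : Int) : ¬ gsLex arr a a := by
  simp [gsLex]

-- stability of PySem's insertion sort, specialised: inserting a fresh largest index keeps gsLex-sortedness
theorem insertBy_stab (arr : List Int) (x : Int) :
    ∀ (ys : List Int), ys.Pairwise (gsLex arr) → (∀ y ∈ ys, y < x) →
    (PySem.List.insertBy (fun a b => decide (gsKey arr a < gsKey arr b)) x ys).Pairwise (gsLex arr) := by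
  intro ys
  induction ys with
  | nil => intro _ _; simp [PySem.List.insertBy]
  | cons y t ih =>
      intro hp hlt
      rw [List.pairwise_cons] at hp
      by_cases h : gsKey arr x < gsKey arr y
      · rw [show PySem.List.insertBy (fun a b => decide (gsKey arr a < gsKey arr b)) x (y :: t)
            = x :: y :: t by simp [PySem.List.insertBy, h]]
        refine List.pairwise_cons.mpr ⟨?_, List.pairwise_cons.mpr hp⟩
        intro z hz
        rcases List.mem_cons.mp hz with hz | hz
        · subst hz; exact Or.inl h
        · exact Or.inl (lt_of_lt_of_le h (by rcases hp.1 z hz with h1 | ⟨h1, _⟩ <;> omega))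
      · rw [show PySem.List.insertBy (fun a b => decide (gsKey arr a < gsKey arr b)) x (y :: t)
            = y :: PySem.List.insertBy (fun a b => decide (gsKey arr a < gsKey arr b)) x t by
            simp [PySem.List.insertBy, h]]
        refine List.pairwise_cons.mpr ⟨?_, ih hp.2 (fun z hz => hlt z (by simp [hz]))⟩
        intro z hz
        rcases (PySem.List.mem_insertBy _ _ _ _).mp hz with hz | hz
        · subst hz
          rcases lt_or_eq_of_le (not_lt.mp h) with h1 | h1
          · exact Or.inl h1
          · exact Or.inr ⟨h1, hlt y (by simp)⟩
        · exact hp.1 z hz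

theorem foldl_insertBy_stab (arr : List Int) :
    ∀ (l acc : List Int), l.Pairwise (· < ·) → acc.Pairwise (gsLex arr) →
    (∀ a ∈ acc, ∀ z ∈ l, a < z) →
    (l.foldl (fun acc x => PySem.List.insertBy (fun a b => decide (gsKey arr a < gsKey arr b)) x acc) acc).Pairwise (gsLex arr) := by
  intro l
  induction l with
  | nil => intro acc _ h _; simpa using h
  | cons x t ih =>
      intro acc hl hacc hfresh
      rw [List.pairwise_cons] at hl
      simp only [List.foldl_cons]
      refine ih _ hl.2 (insertBy_stab arr x acc hacc (fun y hy => hfresh y hy x (by simp))) ?_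
      intro a ha z hz
      rcases (PySem.List.mem_insertBy _ _ _ _).mp ha with ha | ha
      · subst ha; exact hl.1 z hz
      · exact hfresh a ha z (by simp [hz])

-- A's selection order: the stable argsort is gsLex-sorted
theorem order_pairwise (arr : List Int) :
    (PySem.List.sorted (PySem.List.pyRange 0 (PySem.List.len arr)) (gsKey arr) false).Pairwise (gsLex arr) := by
  rw [PySem.List.sorted_eq_foldl_insertBy]
  apply foldl_insertBy_stab
  · rw [show PySem.List.len arr = ((arr.length : Nat) : Int) from rfl,
        PySem.List.pyRange_zero_natCast]
    exact List.pairwise_lt_range.map _ (by intro a b h; exact_mod_cast h)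
  · exact List.Pairwise.nil
  · intro a ha; simp at ha

theorem mem_order (arr : List Int) (i : Int) :
    i ∈ PySem.List.sorted (PySem.List.pyRange 0 (PySem.List.len arr)) (gsKey arr) false ↔
    0 ≤ i ∧ i < (arr.length : Int) := by
  rw [(PySem.List.sorted_perm _ _ _).mem_iff, PySem.List.mem_pyRange_one]
  rfl

theorem arr_sorted_eq (arr : List Int) :
    PySem.List.sorted arr (fun x => x) false =
    (PySem.List.sorted (PySem.List.pyRange 0 (PySem.List.len arr)) (gsKey arr) false).map (gsKey arr) := by
  apply PySem.List.sorted_id_eq_of_perm_of_pairwise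
  · have h1 := (PySem.List.sorted_perm (PySem.List.pyRange 0 (PySem.List.len arr)) (gsKey arr) false).map (gsKey arr)
    have h2 : (PySem.List.pyRange 0 (PySem.List.len arr)).map (gsKey arr) = arr := by
      simpa [gsKey] using PySem.List.map_pyGetD_pyRange_zero arr 0
    rwa [h2] at h1
  · exact (order_pairwise arr).map _ (by
      intro a b h
      rcases h with h | ⟨h, _⟩
      · exact le_of_lt h
      · exact le_of_eq h)

-- first-hit characterisation of the inner scan
theorem gsFind_append (used : List Bool) (val : Int) (l₁ l₂ : List (Int × Int)) (i₀ x₀ : Int)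
    (h₁ : ∀ p ∈ l₁, ¬(used.getD p.1.toNat false = false ∧ p.2 = val))
    (h₂ : used.getD i₀.toNat false = false) (h₃ : x₀ = val) :
    gsFind used val (l₁ ++ (i₀, x₀) :: l₂) = some (i₀, x₀) := by
  induction l₁ with
  | nil =>
      rw [List.nil_append]
      unfold gsFind
      rw [h₂, h₃]
      simp
  | cons p t ih =>
      obtain ⟨i, x⟩ := p
      have hp := h₁ (i, x) (by simp)
      simp only [List.cons_append, gsFind]
      rw [if_neg, ih (fun q hq => h₁ q (by simp [hq]))]
      simp only [Bool.and_eq_true, Bool.not_eq_true', beq_iff_eq, not_and]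
      intro h; exact fun hx => hp ⟨h, hx⟩

theorem enumerate_split (arr : List Int) (m : Nat) (hm : m < arr.length) :
    PySem.List.enumerate arr =
    PySem.List.enumerate (arr.take m) ++ ((m : Int), arr[m]) :: PySem.List.enumerate (arr.drop (m+1)) ((m : Int) + 1) := by
  have key : ∀ (xs : List Int) (k j : Nat) (h : j < xs.length),
      PySem.List.enumerate xs (k : Int) =
      PySem.List.enumerate (xs.take j) (k : Int) ++ (((k + j : Nat) : Int), xs[j]) :: PySem.List.enumerate (xs.drop (j+1)) (((k + j : Nat) : Int) + 1) := by
    intro xs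
    induction xs with
    | nil => intro k j h; simp at h
    | cons x t ih =>
        intro k j h
        cases j with
        | zero => simp [PySem.List.enumerate]
        | succ j' =>
            have hj' : j' < t.length := by simpa using h
            have hc : k + (j' + 1) = (k + 1) + j' := by ring
            simp only [List.take_succ_cons, List.drop_succ_cons, List.getElem_cons_succ,
              PySem.List.enumerate, List.cons_append, hc]
            rw [show ((k : Int) + 1) = ((k + 1 : Nat) : Int) by push_cast; ring]
            rw [ih (k + 1) j' hj']
  simpa using key arr 0 m hm

theorem mem_enumerate_take (arr : List Int) (m : Nat) (p : Int × Int)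
    (hp : p ∈ PySem.List.enumerate (arr.take m)) :
    ∃ j : Nat, ∃ _ : j < m, ∃ hja : j < arr.length, p = ((j : Int), arr[j]) := by
  have key : ∀ (xs : List Int) (k : Nat) (q : Int × Int), q ∈ PySem.List.enumerate xs (k : Int) →
      ∃ j : Nat, ∃ hjl : j < xs.length, q = (((k + j : Nat) : Int), xs[j]) := by
    intro xs
    induction xs with
    | nil => intro k q h; simp [PySem.List.enumerate] at h
    | cons x t ih =>
        intro k q h
        simp only [PySem.List.enumerate, List.mem_cons] at h
        rcases h with h | h
        · exact ⟨0, by simp, by simpa using h⟩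
        · rw [show ((k : Int) + 1) = ((k + 1 : Nat) : Int) by push_cast; ring] at h
          obtain ⟨j, hj, hq⟩ := ih (k + 1) q h
          refine ⟨j + 1, by simpa using hj, ?_⟩
          rw [hq]
          simp only [List.getElem_cons_succ, Prod.mk.injEq]
          exact ⟨by push_cast; ring, trivial⟩
  have hp0 : p ∈ PySem.List.enumerate (arr.take m) ((0 : Nat) : Int) := by simpa using hp
  obtain ⟨j, hj, hq⟩ := key (arr.take m) 0 p hp0
  rw [List.length_take] at hj
  have hjm : j < m := lt_of_lt_of_le hj (min_le_left _ _)
  have hja : j < arr.length := lt_of_lt_of_le hj (min_le_right _ _)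
  refine ⟨j, hjm, hja, ?_⟩
  rw [hq]
  simp only [Prod.mk.injEq]
  exact ⟨by simp, List.getElem_take⟩

-- the main loop invariant: A's loop fed the sorted values equals B's single pass over the sorted indices
theorem gs_loop (arr : List Int) :
    ∀ (os : List Int) (used : List Bool) (steps : List (List Int × List Int)) (result : List Int),
    used.length = arr.length →
    os.Pairwise (gsLex arr) →
    (∀ i ∈ os, 0 ≤ i ∧ i < (arr.length : Int)) →
    (∀ j : Nat, j < arr.length → (used.getD j false = false ↔ (j : Int) ∈ os)) →
    (gsLoopA arr (os.map (gsKey arr)) (steps, used, result)).1 =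
    (os.foldl
      (fun (st : List (List Int × List Int) × List Int) i =>
        let r := st.2 ++ [gsKey arr i]
        (st.1 ++ [([i], r)], r))
      (steps, result)).1 := by
  intro os
  induction os with
  | nil => intro used steps result _ _ _ _; simp [gsLoopA]
  | cons i₀ t ih =>
      intro used steps result hlen hpw hbd hmem
      rw [List.pairwise_cons] at hpw
      obtain ⟨h0, hn⟩ := hbd i₀ (by simp)
      have hnn : i₀.toNat < arr.length := by omega
      have hcast : ((i₀.toNat : Nat) : Int) = i₀ := Int.toNat_of_nonneg h0
      have hkey : gsKey arr i₀ = arr[i₀.toNat] := PySem.List.pyGetD_eq_getElem arr 0 h0 hn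
      -- the inner scan picks exactly i₀
      have hfind : gsFind used (gsKey arr i₀) (PySem.List.enumerate arr) = some (i₀, arr[i₀.toNat]) := by
        have h1 : ∀ p ∈ PySem.List.enumerate (arr.take i₀.toNat),
            ¬(used.getD p.1.toNat false = false ∧ p.2 = gsKey arr i₀) := by
          intro p hp
          obtain ⟨j, hjm, hja, hpe⟩ := mem_enumerate_take arr i₀.toNat p hp
          subst hpe
          simp only [Int.toNat_natCast]
          rintro ⟨hu, hv⟩
          have hjos : (j : Int) ∈ i₀ :: t := (hmem j hja).mp hu
          have hkj : gsKey arr (j : Int) = arr[j] := by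
            rw [gsKey, PySem.List.pyGetD_natCast]; exact List.getD_eq_getElem _ _ hja
          rcases List.mem_cons.mp hjos with hj0 | hjt
          · omega
          · rcases hpw.1 _ hjt with hlt | ⟨heq, hlt⟩
            · rw [hkj, hv] at hlt; omega
            · omega
        have h2 : used.getD ((i₀.toNat : Nat) : Int).toNat false = false := by
          simp only [Int.toNat_natCast]
          exact (hmem i₀.toNat hnn).mpr (by rw [hcast]; simp)
        have hfind' := gsFind_append used (gsKey arr i₀)
          (PySem.List.enumerate (arr.take i₀.toNat))
          (PySem.List.enumerate (arr.drop (i₀.toNat + 1)) (((i₀.toNat : Nat) : Int) + 1))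
          ((i₀.toNat : Nat) : Int) (arr[i₀.toNat]) h1 h2 hkey.symm
        rw [← enumerate_split arr i₀.toNat hnn] at hfind'
        rw [hcast] at hfind'
        exact hfind'
      -- one step of both loops, then the IH
      have hnotin : i₀ ∉ t := fun h => gsLex_irrefl arr i₀ (hpw.1 i₀ h)
      have hstep : gsLoopA arr ((i₀ :: t).map (gsKey arr)) (steps, used, result) =
          gsLoopA arr (t.map (gsKey arr))
            (steps ++ [([i₀], result ++ [arr[i₀.toNat]])], used.set i₀.toNat true,
             result ++ [arr[i₀.toNat]]) := by
        simp only [List.map_cons, gsLoopA, hfind]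
      rw [hstep, List.foldl_cons]
      have hres : (arr[i₀.toNat] : Int) = gsKey arr i₀ := hkey.symm
      rw [hres]
      exact ih (used.set i₀.toNat true) (steps ++ [([i₀], result ++ [gsKey arr i₀])])
        (result ++ [gsKey arr i₀])
        (by simpa using hlen)
        hpw.2
        (fun i hi => hbd i (by simp [hi]))
        (by
          intro j hj
          by_cases hji : j = i₀.toNat
          · subst hji
            constructor
            · intro hu
              rw [List.getD, List.getElem?_set_self (by omega)] at hu
              simp at hu
            · intro hjt; exact absurd (by rwa [hcast] at hjt) hnotin
          · have hne : i₀.toNat ≠ j := fun h => hji h.symm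
            rw [List.getD, List.getElem?_set_ne hne, ← List.getD, hmem j hj]
            constructor
            · intro h
              rcases List.mem_cons.mp h with h | h
              · exact absurd (by omega : j = i₀.toNat) hji
              · exact h
            · intro h; exact List.mem_cons_of_mem _ h)

-- ===== VERDICT (by name: the statement is the Claim_ definition above) =====
theorem generate_greedy_steps_spec : Claim_equal_generate_greedy_steps := by
  intro arr _
  show generate_greedy_steps arr = generate_greedy_steps_alt arr
  unfold generate_greedy_steps generate_greedy_steps_alt
  rw [arr_sorted_eq]
  exact gs_loop arr _ (List.replicate arr.length false) [] []
    (by simp)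
    (order_pairwise arr)
    (fun i hi => (mem_order arr i).mp hi)
    (by
      intro j hj
      constructor
      · intro _
        exact (mem_order arr (j : Int)).mpr ⟨by omega, by omega⟩
      · intro _
        simp)
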